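-- pv_equiv track=rewrite | github.com/SergeiButchak/Python_Algorithm | Lesson_1/task_2.py | find_min_v2
-- ===== SOURCE A (Python) =====
-- def find_min_v2(lst_obj: list):
--     def is_min(list_obj: list, el: int):  # O(n)
--         result = True  # O(1)
--         for ind in range(1, len(list_obj)):  # O(n)
--             if el > list_obj[ind]:  # O(1)
--                 result = False  # O(1)
--
--         return result  # O(1)
--
--     for ind in range(1, len(lst_obj)):  # O(n)
--         if is_min(lst_obj, lst_obj[ind]):  # O(n)
--             return lst_obj[ind]  # O(1)
-- ===== SOURCE B (Python) =====
-- def find_min_v2(lst_obj: list):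
--     # single forward pass over the tail, tracking the running minimum
--     if len(lst_obj) <= 1:
--         return None
--     m = lst_obj[1]
--     for i in range(2, len(lst_obj)):
--         if lst_obj[i] < m:
--             m = lst_obj[i]
--     return m
-- ===== Notes on version B (the rewrite author's own statement) =====
-- stated objective: faster
-- what changed: Replaces A's quadratic scheme (for each tail element, rescan the whole tail to test whether it is a minimum) with one forward pass over the tail that tracks the running minimum.
import Mathlib
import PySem

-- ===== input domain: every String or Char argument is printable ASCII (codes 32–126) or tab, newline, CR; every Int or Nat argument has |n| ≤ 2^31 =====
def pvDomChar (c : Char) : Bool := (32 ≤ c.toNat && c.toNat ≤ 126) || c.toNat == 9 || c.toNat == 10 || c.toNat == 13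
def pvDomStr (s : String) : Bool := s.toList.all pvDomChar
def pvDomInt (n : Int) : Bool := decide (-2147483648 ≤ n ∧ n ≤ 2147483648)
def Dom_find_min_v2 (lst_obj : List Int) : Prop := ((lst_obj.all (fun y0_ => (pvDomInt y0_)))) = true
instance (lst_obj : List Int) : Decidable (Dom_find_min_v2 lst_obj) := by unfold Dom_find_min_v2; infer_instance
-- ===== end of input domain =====

-- B replaces A's per-candidate rescans of the tail (quadratic) with one forward pass tracking the running minimum.

-- ===== PORT A =====
-- inner helper is_min: scans indices 1..len-1, setting result to false whenever el > list_obj[ind]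
def isMinA (list_obj : List Int) (el : Int) : Bool :=
  (PySem.List.pyRange 1 (list_obj.length : Int) 1).foldl
    (fun result ind => if el > PySem.List.pyGetD list_obj ind 0 then false else result) true

-- outer loop: first ind in range(1, len) with is_min(lst_obj, lst_obj[ind]) returns lst_obj[ind]
def loopA (lst_obj : List Int) : List Int → Option Int
  | [] => none
  | ind :: rest =>
    if isMinA lst_obj (PySem.List.pyGetD lst_obj ind 0) then
      some (PySem.List.pyGetD lst_obj ind 0)
    else loopA lst_obj rest

def find_min_v2 (lst_obj : List Int) : Option Int :=
  loopA lst_obj (PySem.List.pyRange 1 (lst_obj.length : Int) 1)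

-- ===== PORT B =====
-- Source B: if len ≤ 1 return None; else m = lst[1], one pass updating m when lst[i] < m
def find_min_v2_alt (lst_obj : List Int) : Option Int :=
  match lst_obj with
  | [] => none
  | [_] => none
  | _ :: h :: rest => some (rest.foldl (fun m x => if x < m then x else m) h)

-- ===== PRECONDITION & SPEC =====
def Spec_find_min_v2 (lst_obj : List Int) (out : Option Int) : Prop := out = find_min_v2_alt lst_obj
instance (lst_obj : List Int) (out : Option Int) : Decidable (Spec_find_min_v2 lst_obj out) := by unfold Spec_find_min_v2; infer_instance

-- ===== CLAIM (what is proved, stated in full; the proofs are below) =====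
def Claim_equal_find_min_v2 : Prop := ∀ (lst_obj : List Int), Dom_find_min_v2 lst_obj → Spec_find_min_v2 lst_obj (find_min_v2 lst_obj)

-- ===== LEMMAS AND PROOFS =====

-- A's is_min over the index range is a fold over the tail of the list
theorem isMinA_eq_drop (l : List Int) (el : Int) :
    isMinA l el = (l.drop 1).foldl (fun result y => if el > y then false else result) true := by
  unfold isMinA
  simpa using PySem.List.foldl_pyRange_pyGetD' l 0 (fun result y => if el > y then false else result) true (a := 1) (by omega)

theorem foldl_isMin_eq_all (el : Int) (t : List Int) (b : Bool) :
    t.foldl (fun result y => if el > y then false else result) b = (b && t.all (fun y => el ≤ y)) := by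
  induction t generalizing b with
  | nil => simp
  | cons y t ih =>
    simp only [List.foldl_cons, List.all_cons, ih]
    by_cases h : el > y
    · simp [h, not_le.mpr h]
    · simp [h, not_lt.mp h]

theorem isMinA_iff (l : List Int) (el : Int) :
    isMinA l el = true ↔ ∀ y ∈ l.drop 1, el ≤ y := by
  rw [isMinA_eq_drop, foldl_isMin_eq_all]
  simp

-- A's outer loop is find? of is_min over the mapped index list
theorem loopA_eq_find? (l : List Int) (idxs : List Int) :
    loopA l idxs = (idxs.map (fun i => PySem.List.pyGetD l i 0)).find? (fun v => isMinA l v) := by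
  induction idxs with
  | nil => rfl
  | cons i rest ih =>
    simp only [loopA, List.map_cons, List.find?_cons]
    by_cases h : isMinA l (PySem.List.pyGetD l i 0)
    · simp [h]
    · simp [h, ih]

-- B's fold with the if is the fold of min
theorem foldl_if_eq_foldl_min (t : List Int) (m : Int) :
    t.foldl (fun m x => if x < m then x else m) m = t.foldl min m := by
  induction t generalizing m with
  | nil => rfl
  | cons x t ih =>
    simp only [List.foldl_cons, ih]
    congr 1
    by_cases h : x < m
    · simp [h, min_eq_right (le_of_lt h)]
    · simp [h, min_eq_left (not_lt.mp h)]

-- ===== VERDICT (by name: the statement is the Claim_ definition above) =====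
theorem find_min_v2_spec : Claim_equal_find_min_v2 := by
  intro lst_obj _
  unfold Spec_find_min_v2
  unfold find_min_v2
  rw [loopA_eq_find?, PySem.List.map_pyGetD_pyRange' lst_obj 0 (by omega)]
  match lst_obj with
  | [] => rfl
  | [_] => rfl
  | a :: h :: rest =>
    show (List.find? (fun v => isMinA (a :: h :: rest) v) (h :: rest)) = find_min_v2_alt (a :: h :: rest)
    show _ = some (rest.foldl (fun m x => if x < m then x else m) h)
    rw [foldl_if_eq_foldl_min]
    set t : List Int := h :: rest with ht
    set m : Int := rest.foldl min h with hm
    have hmem : m ∈ t := by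
      rcases PySem.List.foldl_min_mem rest h with h1 | h1
      · rw [hm, h1, ht]; exact List.mem_cons_self
      · rw [ht]; exact List.mem_cons_of_mem _ (hm ▸ h1)
    have hle : ∀ y ∈ t, m ≤ y := by
      intro y hy
      rcases List.mem_cons.mp (ht ▸ hy) with rfl | hy'
      · exact (PySem.List.foldl_min_le rest y).1
      · exact (PySem.List.foldl_min_le rest h).2 y hy'
    have hdrop : (a :: t).drop 1 = t := rfl
    have hpm : isMinA (a :: t) m = true := (isMinA_iff _ _).mpr (by rw [hdrop]; exact hle)
    have hsome : (List.find? (fun v => isMinA (a :: t) v) t).isSome := by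
      rw [List.find?_isSome]
      exact ⟨m, hmem, hpm⟩
    obtain ⟨v, hv⟩ := Option.isSome_iff_exists.mp hsome
    rw [hv]
    have hvmem : v ∈ t := List.mem_of_find?_eq_some hv
    have hvp : ∀ y ∈ t, v ≤ y := by
      have := List.find?_some hv
      rw [isMinA_iff] at this
      intro y hy; exact this y (hdrop ▸ hy)
    have : v = m := le_antisymm (hvp m hmem) (hle v hvmem)
    rw [this]
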